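-- pv_equiv track=rewrite | github.com/EGrun/redline_django | keyword_generator_internal_v1.py | get_sentence_scores
-- ===== SOURCE A (Python) =====
-- def get_sentence_scores(tags,sentences):
--     # just_tags =[]
--     # for t,_ in tags:
--     #     just_tags.append(t)
--     just_tags =[t for t,_ in tags]
--     important_sentences = {word: {} for word in just_tags}
--
--     for word in just_tags:
--         for sent in sentences:
--             #sent score will estimate the relevancy of a sentence to a keyword
--             if word in sent:
--                 important_sentences[word].update({sent:0})
--
--     for word,sentences_and_scores in important_sentences.items():
--             for entry,score in sentences_and_scores.items():
--                 sent_score = 0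
--                 for w in entry.split(' '):
--                     if w in just_tags:
--                         sent_score+=1
--
--                 sentences_and_scores[entry]=sent_score
--     return important_sentences
-- ===== SOURCE B (Python) =====
-- def get_sentence_scores(tags, sentences):
--     tag_words = set(t for t, _ in tags)
--     distinct_sents = list(dict.fromkeys(sentences))
--     matches = {t: [s for s in distinct_sents if t in s]
--                for t in dict.fromkeys(t for t, _ in tags)}
--     score = {s: sum(1 for w in s.split(' ') if w in tag_words)
--              for s in dict.fromkeys(s for lst in matches.values() for s in lst)}
--     return {t: {s: score[s] for s in lst} for t, lst in matches.items()}
-- ===== Notes on version B (the rewrite author's own statement) =====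
-- stated objective: faster
-- what changed: B dedups tags and sentences up front, substring-scans only the distinct sentences once per distinct tag into per-tag match lists, and splits/scores each matched sentence exactly once against a tag set, instead of A's per-tag rescans and per-(tag,sentence) word recounts against the tag list.
import Mathlib
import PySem

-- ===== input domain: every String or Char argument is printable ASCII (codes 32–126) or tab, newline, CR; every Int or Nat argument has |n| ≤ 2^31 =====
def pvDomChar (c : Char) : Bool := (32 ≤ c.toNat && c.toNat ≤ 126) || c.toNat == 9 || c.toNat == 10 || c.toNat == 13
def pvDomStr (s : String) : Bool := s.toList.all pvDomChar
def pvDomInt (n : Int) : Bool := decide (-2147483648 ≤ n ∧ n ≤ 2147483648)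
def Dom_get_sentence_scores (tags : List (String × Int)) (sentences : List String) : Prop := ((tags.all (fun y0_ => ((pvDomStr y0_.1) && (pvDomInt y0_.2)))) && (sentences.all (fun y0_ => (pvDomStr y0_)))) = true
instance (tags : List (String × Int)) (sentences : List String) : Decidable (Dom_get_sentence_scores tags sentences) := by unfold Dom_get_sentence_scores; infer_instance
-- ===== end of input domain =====

-- B replaces A's tag-by-tag rescans with a tag set plus a per-sentence score dict computed once. Equivalence is exact (same dicts, same order).

-- ===== PORT A =====
-- literal transliteration of A: init dict of empty dicts, nested substring loop, then in-place rescore of each inner dict.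
def get_sentence_scores (tags : List (String × Int)) (sentences : List String) : List (String × List (String × Int)) :=
  let just_tags := tags.map (fun p => p.1)
  -- important_sentences = {word: {} for word in just_tags}
  let important : PySem.Dict String (PySem.Dict String Int) :=
    just_tags.foldl (fun d word => d.insert word PySem.Dict.empty) PySem.Dict.empty
  -- for word in just_tags: for sent in sentences: if word in sent: important_sentences[word].update({sent: 0})
  -- (the key 'word' is always present, so the in-place update of the inner dict is Dict.modify at 'word')
  let important := just_tags.foldl (fun d word =>
    sentences.foldl (fun d sent =>
      if PySem.Str.isIn word sent then
        d.modify word PySem.Dict.empty (fun inner => inner.insert sent 0)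
      else d) d) important
  -- for word, sentences_and_scores in items: for entry, _ in items: sentences_and_scores[entry] = sent_score
  important.items.map (fun p =>
    (p.1,
      (p.2.items.foldl (fun di q =>
        di.insert q.1
          (((PySem.Str.split? q.1 " ").getD []).foldl
            (fun acc w => if just_tags.contains w then acc + 1 else acc) (0 : Int)))
        p.2).items))

-- ===== PORT B =====
-- literal transliteration of B (Source B): tag set, per-tag match lists over the distinct sentences, score dict over the matched sentences only.
def get_sentence_scores_alt (tags : List (String × Int)) (sentences : List String) : List (String × List (String × Int)) :=
  let tag_words : PySem.Set String := PySem.Set.ofList (tags.map (fun p => p.1))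
  let distinct_sents := PySem.List.dedup sentences
  -- matchesL = {t: [s for s in distinct_sents if t in s] for t in dict.fromkeys(just_tags)}
  let matchesL := (PySem.List.dedup (tags.map (fun p => p.1))).map (fun t =>
      (t, distinct_sents.filter (fun s => PySem.Str.isIn t s)))
  -- score = {s: sum(1 for w in s.split(' ') if w in tag_words) for s in dict.fromkeys(s for lst in matchesL.values() for s in lst)}
  let score : PySem.Dict String Int :=
    (PySem.List.dedup (matchesL.flatMap (fun p => p.2))).foldl (fun d s =>
      d.insert s (((((PySem.Str.split? s " ").getD []).countP (fun w => PySem.Set.contains tag_words w) : Nat) : Int)))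
      PySem.Dict.empty
  -- {t: {s: score[s] for s in lst} for t, lst in matches.items()}
  matchesL.map (fun p => (p.1, p.2.map (fun s => (s, score.getD s 0))))

-- ===== PRECONDITION & SPEC =====
def Spec_get_sentence_scores (tags : List (String × Int)) (sentences : List String) (out : List (String × List (String × Int))) : Prop := out = get_sentence_scores_alt tags sentences
instance (tags : List (String × Int)) (sentences : List String) (out : List (String × List (String × Int))) : Decidable (Spec_get_sentence_scores tags sentences out) := by unfold Spec_get_sentence_scores; infer_instance

-- ===== CLAIM (what is proved, stated in full; the proofs are below) =====
def Claim_equal_get_sentence_scores : Prop := ∀ (tags : List (String × Int)) (sentences : List String), Dom_get_sentence_scores tags sentences → Spec_get_sentence_scores tags sentences (get_sentence_scores tags sentences)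

-- ===== LEMMAS AND PROOFS =====

theorem pv_contains_keyed {β : Type} (S : List String) (g : String → β) (w : String) :
    (PySem.Dict.mk (S.map fun k => (k, g k))).contains w = decide (w ∈ S) := by
  rw [Bool.eq_iff_iff]
  simp [PySem.Dict.contains_mk, List.any_map, List.any_eq_true, Function.comp, beq_iff_eq]

-- inserting a constant value turns a constant-valued keyed dict into the Set.add of its keys
theorem pv_insert_const {β : Type} (S : List String) (w : String) (c : β) :
    (PySem.Dict.mk (S.map fun k => (k, c))).insert w c
      = PySem.Dict.mk ((PySem.Set.add S w).map fun k => (k, c)) := by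
  by_cases h : w ∈ S
  · apply PySem.Dict.ext
    rw [PySem.Dict.items_insert_of_contains _ _ (by rw [pv_contains_keyed]; simpa)]
    have hadd : PySem.Set.add S w = S := by simp [PySem.Set.add, h]
    rw [hadd, List.map_map]
    apply List.map_congr_left
    intro k _
    by_cases hk : k = w <;> simp [hk]
  · apply PySem.Dict.ext
    rw [PySem.Dict.items_insert_of_not_contains _ _ (by rw [pv_contains_keyed]; simpa)]
    have hadd : PySem.Set.add S w = S ++ [w] := by simp [PySem.Set.add, h]
    rw [hadd]
    simp

-- phase 1 of A: {word: {} for word in ws}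
theorem pv_phase1 (ws : List String) (S : List String) :
    ws.foldl (fun d word => d.insert word (PySem.Dict.empty : PySem.Dict String Int))
        (PySem.Dict.mk (S.map fun k => (k, PySem.Dict.empty)))
      = PySem.Dict.mk ((PySem.Set.update S ws).map fun k => (k, PySem.Dict.empty)) := by
  induction ws generalizing S with
  | nil => simp [PySem.Set.update]
  | cons w t ih =>
      rw [List.foldl_cons, pv_insert_const, PySem.Set.update_cons]
      exact ih _

-- insert at a present key of a keyed dict rewrites exactly that key's value
theorem pv_insert_keyed {β : Type} (K : List String) (g : String → β) (w : String) (v : β) (hw : w ∈ K) :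
    (PySem.Dict.mk (K.map fun x => (x, g x))).insert w v
      = PySem.Dict.mk (K.map fun x => (x, if x = w then v else g x)) := by
  apply PySem.Dict.ext
  rw [PySem.Dict.items_insert_of_contains _ _ (by rw [pv_contains_keyed]; simpa)]
  rw [List.map_map]
  apply List.map_congr_left
  intro x _
  by_cases hx : x = w <;> simp [hx]

theorem pv_getD_keyed {β : Type} (K : List String) (g : String → β) (w : String) (dflt : β)
    (hK : K.Nodup) (hw : w ∈ K) :
    (PySem.Dict.mk (K.map fun x => (x, g x))).getD w dflt = g w := by
  apply PySem.Dict.getD_of_mem_items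
  · exact List.mem_map.mpr ⟨w, hw, rfl⟩
  · simp only [PySem.Dict.keys_mk, List.map_map, Function.comp_def]
    simpa using hK

-- the inner 'insert sent 0' loop on an all-zero dict is Set.update on its keys
theorem pv_zeros_fold (c : String → Bool) (ss : List String) (S : List String) :
    ss.foldl (fun i s => if c s then i.insert s (0 : Int) else i)
        (PySem.Dict.mk (S.map fun s => (s, (0 : Int))))
      = PySem.Dict.mk ((PySem.Set.update S (ss.filter c)).map fun s => (s, (0 : Int))) := by
  induction ss generalizing S with
  | nil => simp [PySem.Set.update]
  | cons s t ih =>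
      by_cases hc : c s
      · rw [List.foldl_cons]
        simp only [hc, if_true]
        rw [pv_insert_const]
        rw [List.filter_cons_of_pos hc, PySem.Set.update_cons]
        exact ih _
      · rw [List.foldl_cons]
        simp only [hc, if_false, Bool.false_eq_true]
        rw [List.filter_cons_of_neg (by simpa using hc)]
        exact ih S

-- one pass of A's substring loop for a fixed word
theorem pv_word_pass (K : List String) (hK : K.Nodup) (w : String) (hw : w ∈ K)
    (c : String → Bool) (ss : List String) :
    ∀ (g : String → PySem.Dict String Int),
    ss.foldl (fun d s => if c s then d.modify w PySem.Dict.empty (fun i => i.insert s 0) else d)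
        (PySem.Dict.mk (K.map fun x => (x, g x)))
      = PySem.Dict.mk (K.map fun x =>
          (x, if x = w then ss.foldl (fun i s => if c s then i.insert s (0 : Int) else i) (g x) else g x)) := by
  induction ss with
  | nil =>
      intro g
      simp only [List.foldl_nil]
      congr 1
      apply List.map_congr_left
      intro x _
      by_cases hx : x = w <;> simp [hx]
  | cons s t ih =>
      intro g
      by_cases hc : c s
      · rw [List.foldl_cons]
        simp only [hc, if_true]
        rw [show (PySem.Dict.mk (K.map fun x => (x, g x))).modify w PySem.Dict.empty
              (fun i => i.insert s 0)
            = (PySem.Dict.mk (K.map fun x => (x, g x))).insert w ((g w).insert s 0) by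
          simp only [PySem.Dict.modify]
          rw [pv_getD_keyed K g w _ hK hw]]
        rw [pv_insert_keyed K g w _ hw]
        rw [ih (fun x => if x = w then (g w).insert s 0 else g x)]
        congr 1
        apply List.map_congr_left
        intro x _
        by_cases hx : x = w
        · subst hx
          simp [hc]
        · simp [hx]
      · rw [List.foldl_cons]
        simp only [hc, if_false, Bool.false_eq_true]
        rw [ih g]
        congr 1
        apply List.map_congr_left
        intro x _
        by_cases hx : x = w
        · subst hx
          simp [hc]
        · simp [hx]

theorem pv_update_of_subset (S : List String) (l : List String) (h : ∀ x ∈ l, x ∈ S) :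
    PySem.Set.update S l = S := by
  induction l generalizing S with
  | nil => simp [PySem.Set.update]
  | cons x t ih =>
      rw [PySem.Set.update_cons]
      have hadd : PySem.Set.add S x = S := by
        simp [PySem.Set.add, h x (by simp)]
      rw [hadd]
      exact ih S (fun y hy => h y (by simp [hy]))

-- A's whole nested loop: every processed word's inner dict becomes the zero dict over its matching sentences
theorem pv_phase2 (K : List String) (hK : K.Nodup) (sentences : List String) :
    ∀ (ws : List String) (T : String → List String), (∀ w ∈ ws, w ∈ K) →
    (∀ x, T x = [] ∨ T x = PySem.Set.ofList (sentences.filter (fun s => PySem.Str.isIn x s))) →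
    ws.foldl (fun d word =>
        sentences.foldl (fun d sent =>
          if PySem.Str.isIn word sent then d.modify word PySem.Dict.empty (fun i => i.insert sent 0) else d) d)
        (PySem.Dict.mk (K.map fun x => (x, PySem.Dict.mk ((T x).map fun s => (s, (0 : Int))))))
      = PySem.Dict.mk (K.map fun x =>
          (x, PySem.Dict.mk ((if x ∈ ws then PySem.Set.ofList (sentences.filter (fun s => PySem.Str.isIn x s)) else T x).map
            fun s => (s, (0 : Int))))) := by
  intro ws
  induction ws with
  | nil =>
      intro T _ _
      simp
  | cons w t ih =>
      intro T hws hT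
      rw [List.foldl_cons]
      rw [pv_word_pass K hK w (hws w (by simp)) (fun s => PySem.Str.isIn w s) sentences
            (fun x => PySem.Dict.mk ((T x).map fun s => (s, (0 : Int))))]
      have hfold : (sentences.foldl (fun i s => if PySem.Str.isIn w s then i.insert s (0 : Int) else i)
            (PySem.Dict.mk ((T w).map fun s => (s, (0 : Int)))))
          = PySem.Dict.mk ((PySem.Set.ofList (sentences.filter (fun s => PySem.Str.isIn w s))).map
              fun s => (s, (0 : Int))) := by
        rw [pv_zeros_fold]
        rcases hT w with h0 | h0
        · rw [h0, PySem.Set.update_nil_left]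
        · rw [h0, pv_update_of_subset _ _
            (fun y hy => (PySem.Set.mem_ofList _ _).mpr hy)]
      have hstep : (PySem.Dict.mk (K.map fun x =>
            (x, if x = w then sentences.foldl (fun i s => if PySem.Str.isIn w s then i.insert s (0 : Int) else i)
                  (PySem.Dict.mk ((T x).map fun s => (s, (0 : Int))))
                else PySem.Dict.mk ((T x).map fun s => (s, (0 : Int))))))
          = PySem.Dict.mk (K.map fun x =>
              (x, PySem.Dict.mk (((fun y => if y = w
                    then PySem.Set.ofList (sentences.filter (fun s => PySem.Str.isIn y s))
                    else T y) x).map fun s => (s, (0 : Int))))) := by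
        congr 1
        apply List.map_congr_left
        intro x _
        by_cases hx : x = w
        · subst hx
          simp only [if_true]
          exact congrArg _ hfold
        · simp [hx]
      rw [hstep]
      rw [ih (fun y => if y = w
            then PySem.Set.ofList (sentences.filter (fun s => PySem.Str.isIn y s))
            else T y)
          (fun y hy => hws y (by simp [hy]))
          (by
            intro x
            by_cases hx : x = w
            · subst hx; simp
            · simp only [hx, if_false]
              exact hT x)]
      congr 1
      apply List.map_congr_left
      intro x _
      by_cases hxt : x ∈ t
      · simp [hxt]
      · by_cases hx : x = w
        · subst hx; simp [hxt]
        · simp [hx, hxt]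

-- A's rescoring loop over a keyed dict
theorem pv_phase3 (f : String → Int) :
    ∀ (J S : List String) (v : String → Int), (∀ j ∈ J, j ∈ S) →
    J.foldl (fun di j => di.insert j (f j)) (PySem.Dict.mk (S.map fun s => (s, v s)))
      = PySem.Dict.mk (S.map fun s => (s, if s ∈ J then f s else v s)) := by
  intro J
  induction J with
  | nil =>
      intro S v _
      simp
  | cons j t ih =>
      intro S v h
      rw [List.foldl_cons, pv_insert_keyed S v j (f j) (h j (by simp))]
      rw [ih S (fun s => if s = j then f j else v s) (fun y hy => h y (by simp [hy]))]
      congr 1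
      apply List.map_congr_left
      intro s _
      by_cases hst : s ∈ t
      · simp [hst]
      · by_cases hsj : s = j
        · subst hsj; simp [hst]
        · simp [hsj, hst]

-- dedup commutes with filter
theorem pv_ofList_filter (p : String → Bool) (l : List String) :
    PySem.Set.ofList (l.filter p) = (PySem.Set.ofList l).filter p := by
  induction l using List.reverseRecOn with
  | nil => simp [PySem.Set.ofList]
  | append_singleton l x ih =>
      rw [List.filter_append, PySem.Set.ofList_append_singleton]
      by_cases hp : p x
      · simp only [List.filter_cons, hp, if_true, List.filter_nil]
        rw [PySem.Set.ofList_append_singleton, ih]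
        by_cases hm : x ∈ PySem.Set.ofList l
        · have h1 : PySem.Set.add (PySem.Set.ofList l) x = PySem.Set.ofList l := by
            simp [PySem.Set.add, hm]
          have h2 : PySem.Set.add ((PySem.Set.ofList l).filter p) x
              = (PySem.Set.ofList l).filter p := by
            simp [PySem.Set.add, List.mem_filter, hm, hp]
          rw [h1, h2]
        · have h1 : PySem.Set.add (PySem.Set.ofList l) x = PySem.Set.ofList l ++ [x] := by
            simp [PySem.Set.add, hm]
          have h2 : PySem.Set.add ((PySem.Set.ofList l).filter p) x
              = (PySem.Set.ofList l).filter p ++ [x] := by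
            have : x ∉ (PySem.Set.ofList l).filter p := fun hx => hm (List.mem_of_mem_filter hx)
            simp [PySem.Set.add, this]
          rw [h1, h2, List.filter_append]
          simp [hp]
      · simp only [List.filter_cons, hp, Bool.false_eq_true, if_false, List.filter_nil, List.append_nil]
        rw [ih]
        by_cases hm : x ∈ PySem.Set.ofList l
        · have h1 : PySem.Set.add (PySem.Set.ofList l) x = PySem.Set.ofList l := by
            simp [PySem.Set.add, hm]
          rw [h1]
        · have h1 : PySem.Set.add (PySem.Set.ofList l) x = PySem.Set.ofList l ++ [x] := by
            simp [PySem.Set.add, hm]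
          rw [h1, List.filter_append]
          simp [hp]

-- ===== VERDICT (by name: the statement is the Claim_ definition above) =====
theorem get_sentence_scores_spec : Claim_equal_get_sentence_scores := by
  intro tags sentences _
  show get_sentence_scores tags sentences = get_sentence_scores_alt tags sentences
  simp only [get_sentence_scores, get_sentence_scores_alt, PySem.List.dedup_eq_ofList]
  set jt := tags.map (fun p => p.1) with hjt
  set K := PySem.Set.ofList jt with hK
  set D := PySem.Set.ofList sentences with hD
  set cnt := fun e : String => ((PySem.Str.split? e " ").getD []).foldl
      (fun acc w => if jt.contains w then acc + 1 else acc) (0 : Int) with hcntdef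
  set cntB := fun s : String => ((((PySem.Str.split? s " ").getD []).countP
      (fun w => PySem.Set.contains K w) : Nat) : Int) with hcntBdef
  have hKnd : K.Nodup := PySem.Set.nodup_ofList jt
  have hDnd : D.Nodup := PySem.Set.nodup_ofList sentences
  -- phase 1
  have h1 : jt.foldl (fun d word => d.insert word (PySem.Dict.empty : PySem.Dict String Int)) PySem.Dict.empty
      = PySem.Dict.mk (K.map fun x => (x, PySem.Dict.mk ((([] : List String)).map fun s => (s, (0 : Int))))) := by
    have h := pv_phase1 jt []
    simpa [PySem.Set.update_nil_left] using h
  rw [h1]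
  -- phase 2
  rw [pv_phase2 K hKnd sentences jt (fun _ => [])
      (fun w hw => (PySem.Set.mem_ofList _ _).mpr hw) (fun _ => Or.inl rfl)]
  -- phase 3 of A, applied to each inner dict
  have h3 : ∀ F : List String,
      ((PySem.Dict.mk (F.map fun s => (s, (0 : Int)))).items.foldl
          (fun di q => di.insert q.1 (cnt q.1)) (PySem.Dict.mk (F.map fun s => (s, (0 : Int))))).items
        = F.map fun s => (s, cnt s) := by
    intro F
    have hm : (PySem.Dict.mk (F.map fun s => (s, (0 : Int)))).items.foldl
          (fun di q => di.insert q.1 (cnt q.1)) (PySem.Dict.mk (F.map fun s => (s, (0 : Int))))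
        = F.foldl (fun di j => di.insert j (cnt j)) (PySem.Dict.mk (F.map fun s => (s, (0 : Int)))) := by
      rw [List.foldl_map]
    rw [hm, pv_phase3 cnt F F (fun _ => (0 : Int)) (fun j hj => hj)]
    apply List.map_congr_left
    intro s hs
    simp [hs]
  -- B's score dict, over the matched sentences only
  set M := PySem.Set.ofList ((K.map (fun t => (t, D.filter (fun s => PySem.Str.isIn t s)))).flatMap (fun p => p.2)) with hM
  have hMnd : M.Nodup := PySem.Set.nodup_ofList _
  have hcache : (M.foldl (fun d s => d.insert s (cntB s)) PySem.Dict.empty).items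
      = M.map fun s => (s, cntB s) := by
    have h := PySem.Dict.items_foldl_insert_fresh M (fun s => s) (fun s => cntB s)
        PySem.Dict.empty (by intro a _; simp) (by simpa using hMnd)
    simpa using h
  have hget : ∀ s ∈ M, (M.foldl (fun d s => d.insert s (cntB s)) PySem.Dict.empty).getD s 0 = cntB s := by
    intro s hs
    apply PySem.Dict.getD_of_mem_items
    · rw [hcache]
      exact List.mem_map.mpr ⟨s, hs, rfl⟩
    · simp only [PySem.Dict.keys, hcache, List.map_map, Function.comp_def]
      simpa using hMnd
  -- the two per-word counts agree
  have hcnt : ∀ e : String, cnt e = cntB e := by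
    intro e
    rw [hcntdef, hcntBdef]
    simp only [PySem.List.foldl_if_add_one (fun w => jt.contains w), zero_add]
    congr 1
    apply List.countP_congr
    intro w _
    rw [Bool.eq_iff_iff]
    simp [hK, PySem.Set.mem_ofList]
  -- assemble
  simp only [List.map_map]
  apply List.map_congr_left
  intro x hx
  have hxjt : x ∈ jt := (PySem.Set.mem_ofList jt x).mp hx
  simp only [Function.comp_def, hxjt, if_true]
  refine Prod.ext rfl ?_
  rw [h3]
  rw [pv_ofList_filter]
  apply List.map_congr_left
  intro s hs
  have hsM : s ∈ M := by
    rw [hM, PySem.Set.mem_ofList]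
    exact List.mem_flatMap.mpr ⟨(x, D.filter (fun s => PySem.Str.isIn x s)),
      List.mem_map.mpr ⟨x, hx, rfl⟩, hs⟩
  rw [hget s hsM, hcnt s]
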